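-- pv_equiv track=rewrite | github.com/lywgit/project-Euler | prob_023.py | possible_two_number_sum_values
-- ===== SOURCE A (Python) =====
-- def unique(ascending_list):
--     unique_list = [ascending_list[0]]
--     for i in range(1, len(ascending_list)):
--         if ascending_list[i] != unique_list[-1]:
--             unique_list.append(ascending_list[i])
--     return unique_list
--
-- def possible_two_number_sum_values(numbers, cap):
--     sums = []
--     for i in range(len(numbers)):
--         for j in range(len(numbers)):
--             s = numbers[i]+numbers[j]
--             if s <= cap:
--                 sums.append(s)
--     sums.sort()
--     sums = unique(sums)
--     return sums
-- ===== SOURCE B (Python) =====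
-- def _merge_unique(a, b):
--     # two-pointer merge of two strictly increasing lists, dropping duplicates
--     out = []
--     i = j = 0
--     while i < len(a) and j < len(b):
--         if a[i] < b[j]:
--             out.append(a[i]); i += 1
--         elif b[j] < a[i]:
--             out.append(b[j]); j += 1
--         else:
--             out.append(a[i]); i += 1; j += 1
--     out.extend(a[i:])
--     out.extend(b[j:])
--     return out
--
-- def possible_two_number_sum_values(numbers, cap):
--     d = sorted(set(numbers))
--     result = []
--     for x in d:
--         row = [x + y for y in d if x + y <= cap]
--         result = _merge_unique(result, row)
--     return result
-- ===== Notes on version B (the rewrite author's own statement) =====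
-- stated objective: alternative
-- what changed: B never materialises or sorts the n^2 duplicate-laden sum list: it sorts the distinct input values once, then produces each row of sums (x + sorted distinct values) already in ascending order and folds the rows into the result with a deduplicating two-pointer sorted merge, so the output is built directly in sorted distinct form.
import Mathlib
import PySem

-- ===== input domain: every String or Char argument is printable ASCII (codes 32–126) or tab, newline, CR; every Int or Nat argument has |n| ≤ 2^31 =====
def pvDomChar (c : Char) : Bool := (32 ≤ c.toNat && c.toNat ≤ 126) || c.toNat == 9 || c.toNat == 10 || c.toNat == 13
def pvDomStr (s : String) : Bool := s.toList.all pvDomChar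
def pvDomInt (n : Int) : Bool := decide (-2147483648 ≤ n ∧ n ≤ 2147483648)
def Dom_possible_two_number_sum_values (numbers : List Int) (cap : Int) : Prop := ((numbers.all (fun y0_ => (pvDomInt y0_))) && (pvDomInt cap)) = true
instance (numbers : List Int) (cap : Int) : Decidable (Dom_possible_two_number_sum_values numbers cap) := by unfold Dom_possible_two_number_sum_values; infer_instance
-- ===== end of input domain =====

-- B builds the answer by folding already-sorted rows (x + sorted distinct inputs) with a deduplicating two-pointer merge, instead of A's append-all / global sort / adjacent-dedup pass; return values proved equal wherever A returns.

-- ===== PORT A =====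
-- helper 'unique' of A; Python raises IndexError on [], which Pre_ excludes (the [] branch here is unreachable under Pre_)
def pvUniqueA (l : List Int) : List Int :=
  match l with
  | [] => []
  | x :: rest =>
    rest.foldl (fun u a => if some a ≠ PySem.List.pyGet? u (-1) then u ++ [a] else u) [x]

def possible_two_number_sum_values (numbers : List Int) (cap : Int) : List Int :=
  let sums := (PySem.List.pyRange 0 (numbers.length : Int) 1).foldl (fun acc i =>
      (PySem.List.pyRange 0 (numbers.length : Int) 1).foldl (fun acc2 j =>
        let s := PySem.List.pyGetD numbers i 0 + PySem.List.pyGetD numbers j 0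
        if s ≤ cap then acc2 ++ [s] else acc2) acc) []
  pvUniqueA (PySem.List.sorted sums (fun x => x) false)

-- ===== PORT B =====
-- two-pointer merge of two strictly increasing lists, dropping duplicates (Source B's _merge_unique)
def pvMergeUnique : List Int → List Int → List Int
  | [], b => b
  | x :: xs, [] => x :: xs
  | x :: xs, y :: ys =>
    if x < y then x :: pvMergeUnique xs (y :: ys)
    else if y < x then y :: pvMergeUnique (x :: xs) ys
    else x :: pvMergeUnique xs ys
termination_by a b => a.length + b.length

def possible_two_number_sum_values_alt (numbers : List Int) (cap : Int) : List Int :=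
  let d := PySem.List.sorted ((PySem.Set.ofList numbers : List Int)) (fun x => x) false
  d.foldl (fun result x =>
    pvMergeUnique result ((d.filter (fun y => decide (x + y ≤ cap))).map (fun y => x + y))) []

-- ===== PRECONDITION & SPEC =====
-- Pre_ excludes exactly the inputs on which A raises IndexError (no pairwise sum ≤ cap, so unique([]) indexes an empty list).
def Pre_possible_two_number_sum_values (numbers : List Int) (cap : Int) : Prop :=
  ∃ a ∈ numbers, ∃ b ∈ numbers, a + b ≤ cap
instance (numbers : List Int) (cap : Int) : Decidable (Pre_possible_two_number_sum_values numbers cap) := by unfold Pre_possible_two_number_sum_values; infer_instance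

def pvWitness_possible_two_number_sum_values : List Int × Int := ([1, 2], 4)

def Spec_possible_two_number_sum_values (numbers : List Int) (cap : Int) (out : List Int) : Prop := out = possible_two_number_sum_values_alt numbers cap
instance (numbers : List Int) (cap : Int) (out : List Int) : Decidable (Spec_possible_two_number_sum_values numbers cap out) := by unfold Spec_possible_two_number_sum_values; infer_instance

-- ===== CLAIM (what is proved, stated in full; the proofs are below) =====
def Claim_equal_possible_two_number_sum_values : Prop := ∀ (numbers : List Int) (cap : Int), Dom_possible_two_number_sum_values numbers cap → Pre_possible_two_number_sum_values numbers cap → Spec_possible_two_number_sum_values numbers cap (possible_two_number_sum_values numbers cap)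

-- ===== LEMMAS AND PROOFS =====

-- membership in A's inner loop accumulator
theorem memA_inner (a cap : Int) (l : List Int) (init : List Int) (x : Int) :
    x ∈ l.foldl (fun acc2 b => if a + b ≤ cap then acc2 ++ [a + b] else acc2) init ↔
      x ∈ init ∨ ∃ b ∈ l, a + b ≤ cap ∧ x = a + b := by
  induction l generalizing init with
  | nil => simp
  | cons b rest ih =>
    simp only [List.foldl_cons]
    rw [ih]
    by_cases h : a + b ≤ cap <;> simp [h] <;> tauto

-- membership in A's sums list
theorem memA (numbers : List Int) (cap : Int) (init : List Int) (x : Int) :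
    x ∈ numbers.foldl (fun acc a =>
        numbers.foldl (fun acc2 b => if a + b ≤ cap then acc2 ++ [a + b] else acc2) acc) init ↔
      x ∈ init ∨ ∃ a ∈ numbers, ∃ b ∈ numbers, a + b ≤ cap ∧ x = a + b := by
  have main : ∀ (outer : List Int) (init : List Int),
      x ∈ outer.foldl (fun acc a =>
          numbers.foldl (fun acc2 b => if a + b ≤ cap then acc2 ++ [a + b] else acc2) acc) init ↔
        x ∈ init ∨ ∃ a ∈ outer, ∃ b ∈ numbers, a + b ≤ cap ∧ x = a + b := by
    intro outer
    induction outer with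
    | nil => simp
    | cons a rest ih =>
      intro init
      simp only [List.foldl_cons]
      rw [ih, memA_inner]
      simp only [List.mem_cons]
      constructor
      · rintro ((h | ⟨b, hb, hle, hx⟩) | ⟨a', ha', rest'⟩)
        · exact Or.inl h
        · exact Or.inr ⟨a, Or.inl rfl, b, hb, hle, hx⟩
        · exact Or.inr ⟨a', Or.inr ha', rest'⟩
      · rintro (h | ⟨a', (rfl | ha'), b, hb, hle, hx⟩)
        · exact Or.inl (Or.inl h)
        · exact Or.inl (Or.inr ⟨b, hb, hle, hx⟩)
        · exact Or.inr ⟨a', ha', b, hb, hle, hx⟩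
  exact main numbers init

-- the dedup loop of pvUniqueA on a sorted tail, with accumulator v ++ [m]
theorem uniqLoop_char (l : List Int) (v : List Int) (m : Int)
    (hacc : (v ++ [m]).Pairwise (· < ·))
    (hlm : ∀ a ∈ l, m ≤ a) (hl : l.Pairwise (· ≤ ·)) :
    (l.foldl (fun u a => if some a ≠ PySem.List.pyGet? u (-1) then u ++ [a] else u) (v ++ [m])).Pairwise (· < ·) ∧
      (∀ x, x ∈ l.foldl (fun u a => if some a ≠ PySem.List.pyGet? u (-1) then u ++ [a] else u) (v ++ [m]) ↔
        x ∈ v ++ [m] ∨ x ∈ l) := by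
  induction l generalizing v m with
  | nil => exact ⟨hacc, by simp⟩
  | cons a rest ih =>
    have hlast : PySem.List.pyGet? (v ++ [m]) (-1) = some m :=
      PySem.List.pyGet?_neg_one_append_singleton v m
    have hrest : rest.Pairwise (· ≤ ·) := hl.tail
    simp only [List.foldl_cons]
    by_cases hm : a = m
    · subst hm
      rw [hlast, if_neg (by simp)]
      have hr : ∀ b ∈ rest, a ≤ b := fun b hb => (List.pairwise_cons.mp hl).1 b hb
      obtain ⟨h1, h2⟩ := ih v a hacc hr hrest
      refine ⟨h1, fun x => ?_⟩
      rw [h2]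
      simp only [List.mem_append, List.mem_singleton, List.mem_cons]
      tauto
    · rw [hlast, if_pos (by simp [hm])]
      have hma : m < a := lt_of_le_of_ne (hlm a (List.mem_cons_self)) (Ne.symm hm)
      have hacc' : ((v ++ [m]) ++ [a]).Pairwise (· < ·) := by
        rw [List.pairwise_append]
        refine ⟨hacc, List.pairwise_singleton _ _, fun b hb c hc => ?_⟩
        simp only [List.mem_singleton] at hc
        subst hc
        rcases List.mem_append.mp hb with hbv | hbm
        · have : b < m := by
            rw [List.pairwise_append] at hacc
            exact hacc.2.2 b hbv m (List.mem_singleton.mpr rfl)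
          exact lt_trans this hma
        · simp only [List.mem_singleton] at hbm; subst hbm; exact hma
      have hr : ∀ b ∈ rest, a ≤ b := fun b hb => (List.pairwise_cons.mp hl).1 b hb
      obtain ⟨h1, h2⟩ := ih (v ++ [m]) a hacc' hr hrest
      refine ⟨h1, fun x => ?_⟩
      rw [h2]
      simp only [List.mem_append, List.mem_singleton, List.mem_cons]
      tauto

-- pvUniqueA of a ≤-sorted list: strictly increasing, same members
theorem uniqueA_char (l : List Int) (hl : l.Pairwise (· ≤ ·)) :
    (pvUniqueA l).Pairwise (· < ·) ∧ (∀ x, x ∈ pvUniqueA l ↔ x ∈ l) := by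
  cases l with
  | nil => exact ⟨List.Pairwise.nil, by simp [pvUniqueA]⟩
  | cons x rest =>
    have hr : ∀ a ∈ rest, x ≤ a := fun a ha => (List.pairwise_cons.mp hl).1 a ha
    have := uniqLoop_char rest [] x (by simp) hr hl.tail
    simp only [List.nil_append] at this
    obtain ⟨h1, h2⟩ := this
    refine ⟨h1, fun y => ?_⟩
    simp only [pvUniqueA]
    rw [h2]
    simp

-- the deduplicating merge of two strictly increasing lists: strictly increasing, union of members
theorem mergeUnique_char (a b : List Int) (ha : a.Pairwise (· < ·)) (hb : b.Pairwise (· < ·)) :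
    (pvMergeUnique a b).Pairwise (· < ·) ∧
      (∀ z, z ∈ pvMergeUnique a b ↔ z ∈ a ∨ z ∈ b) := by
  induction a, b using pvMergeUnique.induct with
  | case1 b => simpa [pvMergeUnique] using hb
  | case2 x xs => simp [pvMergeUnique, ha]
  | case3 x xs y ys hxy ih =>
    obtain ⟨h1, h2⟩ := ih ha.tail hb
    rw [pvMergeUnique, if_pos hxy]
    constructor
    · rw [List.pairwise_cons]
      refine ⟨fun z hz => ?_, h1⟩
      rcases (h2 z).mp hz with hz | hz
      · exact (List.pairwise_cons.mp ha).1 z hz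
      · rcases List.mem_cons.mp hz with rfl | hz
        · exact hxy
        · exact lt_trans hxy ((List.pairwise_cons.mp hb).1 z hz)
    · intro z; simp only [List.mem_cons, h2]; tauto
  | case4 x xs y ys hxy hyx ih =>
    obtain ⟨h1, h2⟩ := ih ha hb.tail
    rw [pvMergeUnique, if_neg hxy, if_pos hyx]
    constructor
    · rw [List.pairwise_cons]
      refine ⟨fun z hz => ?_, h1⟩
      rcases (h2 z).mp hz with hz | hz
      · rcases List.mem_cons.mp hz with rfl | hz
        · exact hyx
        · exact lt_trans hyx ((List.pairwise_cons.mp ha).1 z hz)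
      · exact (List.pairwise_cons.mp hb).1 z hz
    · intro z; simp only [List.mem_cons, h2]; tauto
  | case5 x xs y ys hxy hyx ih =>
    have hxy' : x = y := le_antisymm (not_lt.mp hyx) (not_lt.mp hxy)
    obtain ⟨h1, h2⟩ := ih ha.tail hb.tail
    rw [pvMergeUnique, if_neg hxy, if_neg hyx]
    constructor
    · rw [List.pairwise_cons]
      refine ⟨fun z hz => ?_, h1⟩
      rcases (h2 z).mp hz with hz | hz
      · exact (List.pairwise_cons.mp ha).1 z hz
      · rw [hxy']; exact (List.pairwise_cons.mp hb).1 z hz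
    · intro z; simp only [List.mem_cons, h2, hxy']; tauto

-- one row of B is strictly increasing
theorem rowB_pairwise (d : List Int) (x cap : Int) (hd : d.Pairwise (· < ·)) :
    ((d.filter (fun y => decide (x + y ≤ cap))).map (fun y => x + y)).Pairwise (· < ·) := by
  refine List.Pairwise.map _ (fun a b h => by omega) (hd.filter _)

-- B's merge fold: strictly increasing accumulator, membership = union of rows
theorem foldB_char (d : List Int) (cap : Int) (hd : d.Pairwise (· < ·)) :
    ∀ (l : List Int) (acc : List Int), acc.Pairwise (· < ·) →
      (l.foldl (fun result x =>
          pvMergeUnique result ((d.filter (fun y => decide (x + y ≤ cap))).map (fun y => x + y))) acc).Pairwise (· < ·) ∧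
      (∀ z, z ∈ l.foldl (fun result x =>
          pvMergeUnique result ((d.filter (fun y => decide (x + y ≤ cap))).map (fun y => x + y))) acc ↔
        z ∈ acc ∨ ∃ x ∈ l, ∃ y ∈ d, x + y ≤ cap ∧ z = x + y) := by
  intro l
  induction l with
  | nil => intro acc hacc; exact ⟨hacc, by simp⟩
  | cons x rest ih =>
    intro acc hacc
    simp only [List.foldl_cons]
    obtain ⟨hm1, hm2⟩ := mergeUnique_char acc _ hacc (rowB_pairwise d x cap hd)
    obtain ⟨h1, h2⟩ := ih _ hm1
    refine ⟨h1, fun z => ?_⟩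
    rw [h2]
    have hrow : ∀ z, z ∈ (d.filter (fun y => decide (x + y ≤ cap))).map (fun y => x + y) ↔
        ∃ y ∈ d, x + y ≤ cap ∧ z = x + y := by
      intro z
      simp only [List.mem_map, List.mem_filter, decide_eq_true_eq]
      constructor
      · rintro ⟨y, ⟨hy, hle⟩, rfl⟩; exact ⟨y, hy, hle, rfl⟩
      · rintro ⟨y, hy, hle, rfl⟩; exact ⟨y, ⟨hy, hle⟩, rfl⟩
    rw [hm2, hrow]
    simp only [List.mem_cons]
    constructor
    · rintro ((h | ⟨y, hy, hle, rfl⟩) | ⟨x', hx', y, hy, hle, rfl⟩)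
      · exact Or.inl h
      · exact Or.inr ⟨x, Or.inl rfl, y, hy, hle, rfl⟩
      · exact Or.inr ⟨x', Or.inr hx', y, hy, hle, rfl⟩
    · rintro (h | ⟨x', (rfl | hx'), y, hy, hle, rfl⟩)
      · exact Or.inl (Or.inl h)
      · exact Or.inl (Or.inr ⟨y, hy, hle, rfl⟩)
      · exact Or.inr ⟨x', hx', y, hy, hle, rfl⟩

-- B's output: strictly increasing, members = pairwise sums ≤ cap
theorem altB_char (numbers : List Int) (cap : Int) :
    (possible_two_number_sum_values_alt numbers cap).Pairwise (· < ·) ∧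
      (∀ z, z ∈ possible_two_number_sum_values_alt numbers cap ↔
        ∃ a ∈ numbers, ∃ b ∈ numbers, a + b ≤ cap ∧ z = a + b) := by
  unfold possible_two_number_sum_values_alt
  set d := PySem.List.sorted ((PySem.Set.ofList numbers : List Int)) (fun x => x) false with hddef
  have hd : d.Pairwise (· < ·) := PySem.List.sorted_ofList_pairwise_lt numbers
  obtain ⟨h1, h2⟩ := foldB_char d cap hd d [] (by simp)
  refine ⟨h1, fun z => ?_⟩
  rw [h2]
  have hmemd : ∀ x, x ∈ d ↔ x ∈ numbers := by
    intro x
    rw [hddef, PySem.List.mem_sorted, PySem.Set.mem_ofList]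
  simp only [List.not_mem_nil, false_or, hmemd]

-- ===== VERDICT (by name: the statement is the Claim_ definition above) =====
theorem possible_two_number_sum_values_spec : Claim_equal_possible_two_number_sum_values := by
  intro numbers cap _ _
  unfold Spec_possible_two_number_sum_values
  unfold possible_two_number_sum_values
  have hL : (PySem.List.pyRange 0 (numbers.length : Int) 1).foldl (fun acc i =>
      (PySem.List.pyRange 0 (numbers.length : Int) 1).foldl (fun acc2 j =>
        let s := PySem.List.pyGetD numbers i 0 + PySem.List.pyGetD numbers j 0
        if s ≤ cap then acc2 ++ [s] else acc2) acc) ([] : List Int)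
      = numbers.foldl (fun acc a =>
        numbers.foldl (fun acc2 b => if a + b ≤ cap then acc2 ++ [a + b] else acc2) acc) [] := by
    rw [PySem.List.foldl_pyRange_zero_pyGetD' numbers 0 (fun acc a =>
        (PySem.List.pyRange 0 (numbers.length : Int) 1).foldl (fun acc2 j =>
          let s := a + PySem.List.pyGetD numbers j 0
          if s ≤ cap then acc2 ++ [s] else acc2) acc) []]
    apply PySem.List.foldl_congr_mem
    intro acc a _
    exact PySem.List.foldl_pyRange_zero_pyGetD' numbers 0 (fun acc2 b =>
        if a + b ≤ cap then acc2 ++ [a + b] else acc2) acc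
  simp only [hL]
  set L : List Int := numbers.foldl (fun acc a =>
      numbers.foldl (fun acc2 b => if a + b ≤ cap then acc2 ++ [a + b] else acc2) acc) [] with hLdef
  have hsortedL : (PySem.List.sorted L (fun x => x) false).Pairwise (· ≤ ·) := by
    have := PySem.List.sorted_pairwise L (fun x => x)
    simpa using this
  obtain ⟨hltA, hmemU⟩ := uniqueA_char _ hsortedL
  obtain ⟨hltB, hmemB⟩ := altB_char numbers cap
  have hnodupA : (pvUniqueA (PySem.List.sorted L (fun x => x) false)).Nodup :=
    hltA.imp (fun h => ne_of_lt h)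
  have hnodupB : (possible_two_number_sum_values_alt numbers cap).Nodup :=
    hltB.imp (fun h => ne_of_lt h)
  have hmem : ∀ x, x ∈ pvUniqueA (PySem.List.sorted L (fun x => x) false) ↔
      x ∈ possible_two_number_sum_values_alt numbers cap := by
    intro x
    rw [hmemU, PySem.List.mem_sorted, hLdef, memA, hmemB]
    simp
  have hperm : (pvUniqueA (PySem.List.sorted L (fun x => x) false)).Perm
      (possible_two_number_sum_values_alt numbers cap) :=
    (List.perm_ext_iff_of_nodup hnodupA hnodupB).mpr hmem
  have h1 : PySem.List.sorted (possible_two_number_sum_values_alt numbers cap) (fun x => x) false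
      = pvUniqueA (PySem.List.sorted L (fun x => x) false) :=
    PySem.List.sorted_eq_of_perm_of_pairwise_lt _ _ _ hperm (by simpa using hltA)
  have h2 : PySem.List.sorted (possible_two_number_sum_values_alt numbers cap) (fun x => x) false
      = possible_two_number_sum_values_alt numbers cap :=
    PySem.List.sorted_eq_self_of_pairwise _ _ (by simpa using hltB.imp le_of_lt)
  rw [← h1, h2]
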